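-- pv_equiv track=rewrite | github.com/umarprogrammer19/Digital-Pakistan-Speed-Programming-Competition-DPSPC | ONLINE_QUALIFIERS_ROUND_2/8_GR.py | win_in_2_rounds
-- ===== SOURCE A (Python) =====
-- def win_in_2_rounds(n, d):
--     if d == 1:
--         for p in range(n + 1, n + 101):
--             naan, plate = n, p
--             eat = min(naan, plate)
--             naan -= eat
--             plate -= eat
--             if naan == 0:
--                 naan = n // 2
--             elif plate == 0:
--                 plate = p // 2
--             else:
--                 continue
--             eat = min(naan, plate)
--             naan -= eat
--             plate -= eat
--             if naan == 0 and plate == 0: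
--                 return p
--     else:
--         for p in range(n - 1, 0, -1):
--             naan, plate = n, p
--             eat = min(naan, plate)
--             naan -= eat
--             plate -= eat
--             if naan == 0:
--                 naan = n // 2
--             elif plate == 0:
--                 plate = p // 2
--             else:
--                 continue
--             eat = min(naan, plate)
--             naan -= eat
--             plate -= eat
--             if naan == 0 and plate == 0:
--                 return p
--     return -1
-- ===== SOURCE B (Python) =====
-- def win_in_2_rounds(n, d):
--     # Closed form: solve the "empty in exactly 2 rounds" equation directly.
--     if d == 1:
--         h = n // 2
--         return n + h if 1 <= h <= 100 else -1
--     r = n % 3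
--     if r == 2:
--         return -1
--     p = (2 * n + 1) // 3 if r == 1 else (2 * n) // 3
--     return p if 1 <= p <= n - 1 else -1
-- ===== Notes on version B (the rewrite author's own statement) =====
-- stated objective: faster
-- what changed: A simulates the two eating rounds for every candidate plate count in a linear (resp. 100-wide) scan; B solves the two-round equations n = p + p//2 (d != 1) and p = n + n//2 (d == 1) in closed form and just range-checks the unique candidate.
import Mathlib
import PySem

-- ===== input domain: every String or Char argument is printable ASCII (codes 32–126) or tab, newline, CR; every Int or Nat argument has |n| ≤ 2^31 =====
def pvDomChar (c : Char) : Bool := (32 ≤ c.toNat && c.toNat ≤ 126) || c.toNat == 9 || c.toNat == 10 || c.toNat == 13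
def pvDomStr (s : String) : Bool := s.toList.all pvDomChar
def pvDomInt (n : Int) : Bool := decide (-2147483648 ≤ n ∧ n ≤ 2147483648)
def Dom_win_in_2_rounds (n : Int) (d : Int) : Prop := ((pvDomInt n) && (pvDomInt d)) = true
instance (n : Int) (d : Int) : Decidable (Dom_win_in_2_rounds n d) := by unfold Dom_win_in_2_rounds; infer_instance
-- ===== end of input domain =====

-- B replaces A's linear scan of candidate plate counts by solving the two-round equation in closed form (objective: faster).

-- ===== PORT A =====
-- loop body of A: the two-round simulation for one candidate p; `some p` = A's `return p`, `none` = fall through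
def winBody (n p : Int) : Option Int :=
  let naan := n
  let plate := p
  let eat := min naan plate
  let naan := naan - eat
  let plate := plate - eat
  if naan = 0 then
    let naan := PySem.Int.floordiv n 2
    let eat := min naan plate
    let naan := naan - eat
    let plate := plate - eat
    if naan = 0 ∧ plate = 0 then some p else none
  else if plate = 0 then
    let plate := PySem.Int.floordiv p 2
    let eat := min naan plate
    let naan := naan - eat
    let plate := plate - eat
    if naan = 0 ∧ plate = 0 then some p else none
  else none

def win_in_2_rounds (n : Int) (d : Int) : Int :=
  if d = 1 then
    ((PySem.List.pyRange (n + 1) (n + 101) 1).findSome? (winBody n)).getD (-1)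
  else
    ((PySem.List.pyRange (n - 1) 0 (-1)).findSome? (winBody n)).getD (-1)

-- ===== PORT B =====
def win_in_2_rounds_alt (n : Int) (d : Int) : Int :=
  if d = 1 then
    let h := PySem.Int.floordiv n 2
    if 1 ≤ h ∧ h ≤ 100 then n + h else -1
  else
    let r := PySem.Int.mod n 3
    if r = 2 then -1
    else
      let p := if r = 1 then PySem.Int.floordiv (2 * n + 1) 3 else PySem.Int.floordiv (2 * n) 3
      if 1 ≤ p ∧ p ≤ n - 1 then p else -1

-- ===== PRECONDITION & SPEC =====
def Spec_win_in_2_rounds (n : Int) (d : Int) (out : Int) : Prop := out = win_in_2_rounds_alt n d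
instance (n : Int) (d : Int) (out : Int) : Decidable (Spec_win_in_2_rounds n d out) := by unfold Spec_win_in_2_rounds; infer_instance

-- ===== CLAIM (what is proved, stated in full; the proofs are below) =====
def Claim_equal_win_in_2_rounds : Prop := ∀ (n : Int) (d : Int), Dom_win_in_2_rounds n d → Spec_win_in_2_rounds n d (win_in_2_rounds n d)

-- ===== LEMMAS AND PROOFS =====

-- for p above n (the d == 1 scan), A's body returns p exactly when p = n + n // 2
lemma winBody_gt (n p : Int) (h : n < p) :
    winBody n p = if p = n + n / 2 then some p else none := by
  unfold winBody
  rw [PySem.Int.floordiv_eq_ediv_of_pos (a := n) (by norm_num)]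
  simp only
  split_ifs <;> first | rfl | (exfalso; omega)

-- for p strictly between 0 and n (the d != 1 scan), A's body returns p exactly when n - p = p // 2
lemma winBody_lt (n p : Int) (_h0 : 0 < p) (h : p < n) :
    winBody n p = if n - p = p / 2 then some p else none := by
  unfold winBody
  rw [PySem.Int.floordiv_eq_ediv_of_pos (a := p) (by norm_num)]
  simp only
  split_ifs <;> first | rfl | (exfalso; omega)

-- findSome? of a body that fires only at one fixed target
lemma findSome?_unique {α : Type} [DecidableEq α] (f : α → Option α) (p0 : α) :
    ∀ (l : List α), (∀ p ∈ l, f p = if p = p0 then some p else none) →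
      l.findSome? f = if p0 ∈ l then some p0 else none
  | [], _ => by simp
  | a :: t, h => by
    have ha := h a (List.mem_cons_self ..)
    rw [List.findSome?_cons]
    by_cases hp : a = p0
    · subst hp; rw [ha]; simp
    · rw [ha, if_neg hp,
        findSome?_unique f p0 t (fun p hp' => h p (List.mem_cons_of_mem _ hp'))]
      by_cases hm : p0 ∈ t <;> simp [hm, Ne.symm hp]

-- ===== VERDICT (by name: the statement is the Claim_ definition above) =====
theorem win_in_2_rounds_spec : Claim_equal_win_in_2_rounds := by
  unfold Claim_equal_win_in_2_rounds Spec_win_in_2_rounds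
  intro n d _
  unfold win_in_2_rounds win_in_2_rounds_alt
  rw [PySem.Int.floordiv_eq_ediv_of_pos (a := n) (by norm_num),
    PySem.Int.mod_eq_emod_of_pos (a := n) (by norm_num),
    PySem.Int.floordiv_eq_ediv_of_pos (a := 2 * n + 1) (by norm_num),
    PySem.Int.floordiv_eq_ediv_of_pos (a := 2 * n) (by norm_num)]
  by_cases hd : d = 1
  · -- ascending scan: the unique hit is p0 = n + n / 2
    rw [if_pos hd, if_pos hd]
    have key : ∀ p ∈ PySem.List.pyRange (n + 1) (n + 101) 1,
        winBody n p = if p = n + n / 2 then some p else none := by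
      intro p hp
      rw [PySem.List.mem_pyRange_one] at hp
      exact winBody_gt n p (by omega)
    rw [findSome?_unique (winBody n) (n + n / 2) _ key]
    simp only [PySem.List.mem_pyRange_one]
    split_ifs <;> simp only [Option.getD_some, Option.getD_none] <;> omega
  · -- descending scan: the unique hit is B's closed-form candidate
    rw [if_neg hd, if_neg hd]
    have key : ∀ p ∈ PySem.List.pyRange (n - 1) 0 (-1),
        winBody n p =
          if p = (if n % 3 = 2 then 0
                  else if n % 3 = 1 then (2 * n + 1) / 3 else (2 * n) / 3)
          then some p else none := by
      intro p hp
      rw [PySem.List.mem_pyRange_neg_one] at hp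
      rw [winBody_lt n p hp.1 (by omega)]
      split_ifs <;> first | rfl | (exfalso; omega)
    rw [findSome?_unique (winBody n) _ _ key]
    simp only [PySem.List.mem_pyRange_neg_one]
    split_ifs <;> simp only [Option.getD_some, Option.getD_none] <;> omega
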